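-- pv_equiv track=rewrite | github.com/pp20u1515/Data_Base | lab_07/task_01.py | query_05
-- ===== SOURCE A (Python) =====
-- def query_05(users):
--     grouped_users = {}
--     for user in users:
--         city = user['user_city']
--         if city not in grouped_users:
--             grouped_users[city] = 1
--         else:
--             grouped_users[city] += 1
--
--     result_sorted = sorted(grouped_users.items(), key=lambda x: x[0])
--     return result_sorted
-- ===== SOURCE B (Python) =====
-- from itertools import groupby
--
--
-- def query_05(users):
--     cities = sorted(user['user_city'] for user in users)
--     return [(city, sum(1 for _ in group)) for city, group in groupby(cities)]
-- ===== Notes on version B (the rewrite author's own statement) =====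
-- stated objective: alternative
-- what changed: B replaces A's dict-counting pass followed by sorting the (city,count) items with a sort of the city list first and a single groupby-style run-length pass that emits the already-sorted (city,count) pairs.
import Mathlib
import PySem

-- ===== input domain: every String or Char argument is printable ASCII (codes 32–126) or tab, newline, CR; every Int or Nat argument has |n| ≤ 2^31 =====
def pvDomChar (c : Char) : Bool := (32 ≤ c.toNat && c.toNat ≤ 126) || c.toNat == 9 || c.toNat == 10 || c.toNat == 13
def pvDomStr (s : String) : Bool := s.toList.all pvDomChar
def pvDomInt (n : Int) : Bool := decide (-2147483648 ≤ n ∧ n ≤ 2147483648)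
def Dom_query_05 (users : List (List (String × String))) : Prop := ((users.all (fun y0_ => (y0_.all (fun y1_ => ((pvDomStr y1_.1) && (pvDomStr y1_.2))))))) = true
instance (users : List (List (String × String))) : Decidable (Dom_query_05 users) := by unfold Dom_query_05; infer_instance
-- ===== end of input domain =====

-- B replaces A's dict-counting pass followed by sorting the (city,count) items with a
-- sort of the city list and one groupby-style run-length pass (same asymptotic cost).

-- shared helper: user['user_city'] (total form; Pre_ guarantees the key is present)
def pvCity (user : List (String × String)) : String :=
  (PySem.Dict.mk user).getD "user_city" ""

-- ===== PORT A =====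
def query_05 (users : List (List (String × String))) : List (String × Int) :=
  let grouped := users.foldl (fun d user =>
    let city := pvCity user
    if d.contains city = false then d.insert city 1
    else d.insert city (d.getD city 0 + 1)) (PySem.Dict.empty : PySem.Dict String Int)
  PySem.List.sorted grouped.items (fun p => p.1) false

-- ===== PORT B =====
-- itertools.groupby over a sorted list: emit (run head, run length) for each maximal run
def pvRuns : List String → List (String × Int)
  | [] => []
  | c :: rest =>
    (c, 1 + ((rest.takeWhile (fun x => x == c)).length : Int)) ::
      pvRuns (rest.dropWhile (fun x => x == c))
termination_by l => l.length
decreasing_by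
  simpa using Nat.lt_succ_of_le (List.length_dropWhile_le _ _)

def query_05_alt (users : List (List (String × String))) : List (String × Int) :=
  pvRuns (PySem.List.sorted (users.map (fun user => pvCity user)) (fun x => x) false)

-- ===== PRECONDITION & SPEC =====
-- Pre_ excludes exactly the inputs where some user dict lacks the 'user_city' key, on which A raises KeyError.
def Pre_query_05 (users : List (List (String × String))) : Prop :=
  (users.all (fun user => user.any (fun p => p.1 == "user_city"))) = true
instance (users : List (List (String × String))) : Decidable (Pre_query_05 users) := by
  unfold Pre_query_05; infer_instance

def pvWitness_query_05 : (List (List (String × String))) :=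
  [[("user_city", "Pavlodar")], [("user_city", "Astana"), ("age", "7")], [("user_city", "Astana")]]

def Spec_query_05 (users : List (List (String × String))) (out : List (String × Int)) : Prop := out = query_05_alt users
instance (users : List (List (String × String))) (out : List (String × Int)) : Decidable (Spec_query_05 users out) := by unfold Spec_query_05; infer_instance

-- ===== CLAIM (what is proved, stated in full; the proofs are below) =====
def Claim_equal_query_05 : Prop := ∀ (users : List (List (String × String))), Dom_query_05 users → Pre_query_05 users → Spec_query_05 users (query_05 users)

-- ===== LEMMAS AND PROOFS =====

-- On a sorted list, pvRuns pairs every key with its count, its keys are strictly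
-- increasing, and its keys are exactly the elements of the list.
theorem pvRuns_sorted_props (s : List String) (hs : s.Pairwise (· ≤ ·)) :
    (∀ p ∈ pvRuns s, p.2 = (s.count p.1 : Int)) ∧
    ((pvRuns s).map Prod.fst).Pairwise (· < ·) ∧
    (∀ c, c ∈ (pvRuns s).map Prod.fst ↔ c ∈ s) := by
  induction s using pvRuns.induct with
  | case1 => simp [pvRuns]
  | case2 c rest ih =>
    rw [List.pairwise_cons] at hs
    obtain ⟨hle, hrest⟩ := hs
    set t := rest.takeWhile (fun x => x == c) with ht0
    set d := rest.dropWhile (fun x => x == c) with hd0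
    have hsplit : t ++ d = rest := List.takeWhile_append_dropWhile
    have ht_all : ∀ x ∈ t, x = c := fun x hx => by
      have := List.mem_takeWhile_imp hx; simpa using this
    have hd_sub : d.Sublist rest := List.dropWhile_sublist _
    have hd_pw : d.Pairwise (· ≤ ·) := hrest.sublist hd_sub
    have hd_gt : ∀ x ∈ d, c < x := by
      intro x hx
      rcases hd : d with _ | ⟨h0, tl⟩
      · simp [hd] at hx
      · have h1 : rest.dropWhile (fun x => x == c) = h0 :: tl := hd0.symm.trans hd
        have h2 := List.head_dropWhile_not (fun x => x == c) (l := rest) (by simp [h1])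
        simp only [h1, List.head_cons, beq_eq_false_iff_ne, ne_eq] at h2
        have hch0 : c < h0 :=
          lt_of_le_of_ne (hle h0 (hd_sub.mem (by simp [hd]))) (Ne.symm h2)
        rw [hd] at hx hd_pw
        rcases List.mem_cons.mp hx with rfl | hx
        · exact hch0
        · exact lt_of_lt_of_le hch0 ((List.pairwise_cons.mp hd_pw).1 x hx)
    have hc_not_d : c ∉ d := fun h => lt_irrefl c (hd_gt c h)
    obtain ⟨ihcnt, ihpw, ihmem⟩ := ih hd_pw
    have h1 : t.count c = t.length :=
      List.count_eq_length.mpr fun b hb => ((ht_all b hb).symm : c = b) ▸ rfl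
    have h2 : d.count c = 0 := List.count_eq_zero.mpr hc_not_d
    have hrc : rest.count c = t.length := by
      rw [← hsplit, List.count_append, h1, h2]; omega
    rw [pvRuns, ← ht0, ← hd0]
    refine ⟨?_, ?_, ?_⟩
    · intro p hp
      rcases List.mem_cons.mp hp with hp | hp
      · subst hp
        simp only [List.count_cons_self, hrc]
        push_cast
        ring
      · have hmem : p.1 ∈ d := (ihmem p.1).mp (List.mem_map_of_mem hp)
        have hne : p.1 ≠ c := fun h => lt_irrefl c (h ▸ hd_gt _ hmem)
        have hnt : p.1 ∉ t := fun h => hne (ht_all _ h)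
        have hcc : (c :: rest).count p.1 = d.count p.1 := by
          rw [List.count_cons, ← hsplit, List.count_append,
            List.count_eq_zero.mpr hnt]
          simp [Ne.symm hne]
        rw [ihcnt p hp, hcc]
    · simp only [List.map_cons, List.pairwise_cons]
      exact ⟨fun x hx => hd_gt x ((ihmem x).mp hx), ihpw⟩
    · intro c'
      have hmr : c' ∈ rest ↔ c' ∈ t ∨ c' ∈ d := by rw [← hsplit]; exact List.mem_append
      simp only [List.map_cons, List.mem_cons, ihmem, hmr]
      constructor
      · rintro (rfl | h)
        · exact Or.inl rfl
        · exact Or.inr (Or.inr h)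
      · rintro (rfl | h | h)
        · exact Or.inl rfl
        · exact Or.inl (ht_all _ h)
        · exact Or.inr h

-- A's grouping loop builds exactly Counter(cities); then its sorted items are
-- matched against B's run list via sorted_eq_of_perm_of_pairwise_lt.
theorem query_05_eq_alt (users : List (List (String × String))) :
    query_05 users = query_05_alt users := by
  have hfold : users.foldl (fun d user =>
      let city := pvCity user
      if d.contains city = false then d.insert city 1
      else d.insert city (d.getD city 0 + 1)) (PySem.Dict.empty : PySem.Dict String Int)
      = PySem.Dict.counter (users.map (fun user => pvCity user)) := by
    calc users.foldl (fun d user =>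
          let city := pvCity user
          if d.contains city = false then d.insert city 1
          else d.insert city (d.getD city 0 + 1)) (PySem.Dict.empty : PySem.Dict String Int)
        = users.foldl (fun d user =>
            d.insert (pvCity user) (d.getD (pvCity user) 0 + 1))
            (PySem.Dict.empty : PySem.Dict String Int) := by
          refine PySem.List.foldl_congr_mem _ _ _ _ ?_
          intro acc u _
          show (if acc.contains (pvCity u) = false then acc.insert (pvCity u) 1
            else acc.insert (pvCity u) (acc.getD (pvCity u) 0 + 1)) = _
          by_cases h : acc.contains (pvCity u) = false
          · rw [if_pos h, PySem.Dict.getD_of_not_contains acc 0 h]; norm_num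
          · rw [if_neg h]
      _ = (users.map (fun user => pvCity user)).foldl
            (fun d x => d.insert x (d.getD x 0 + 1)) (PySem.Dict.empty : PySem.Dict String Int) := by
          rw [List.foldl_map]
      _ = PySem.Dict.counter (users.map (fun user => pvCity user)) :=
          PySem.Dict.foldl_insert_getD_add_one_eq_counter _
  simp only [query_05, query_05_alt]
  set cities := users.map (fun user => pvCity user) with hcities
  set s := PySem.List.sorted cities (fun x => x) false with hsdef
  obtain ⟨hcnt, hpw, hmem⟩ :=
    pvRuns_sorted_props s (PySem.List.sorted_pairwise cities (fun x => x))
  have hsp : s.Perm cities := PySem.List.sorted_perm cities (fun x => x) false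
  have hfst_nodup : ((pvRuns s).map Prod.fst).Nodup := hpw.imp ne_of_lt
  have hpermfst : ((pvRuns s).map Prod.fst).Perm (PySem.Set.ofList cities) :=
    (List.perm_ext_iff_of_nodup hfst_nodup (PySem.Set.nodup_ofList cities)).mpr
      (fun a => by rw [hmem a, hsp.mem_iff, PySem.Set.mem_ofList])
  have hself : pvRuns s
      = ((pvRuns s).map Prod.fst).map (fun k => (k, (cities.count k : Int))) := by
    rw [List.map_map]
    refine ((List.map_congr_left ?_).trans (List.map_id _)).symm
    intro p hp
    have := hcnt p hp
    cases p with
    | mk a b =>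
      simp only [Function.comp, id_eq, Prod.mk.injEq, true_and]
      rw [← hsp.count_eq]
      exact this.symm
  have hperm : (pvRuns s).Perm
      ((PySem.Set.ofList cities).map (fun k => (k, (cities.count k : Int)))) := by
    rw [hself]; exact hpermfst.map _
  have hpair2 : (pvRuns s).Pairwise (fun a b => a.1 < b.1) := List.pairwise_map.mp hpw
  rw [hfold, PySem.Dict.items_counter]
  exact PySem.List.sorted_eq_of_perm_of_pairwise_lt _ _ _ hperm hpair2

-- ===== VERDICT (by name: the statement is the Claim_ definition above) =====
theorem query_05_spec : Claim_equal_query_05 := by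
  intro users _hdom _hpre
  exact query_05_eq_alt users
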